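-- pv_equiv track=rewrite | github.com/Tropidophiidae/python_basics | module_3/task_3.py | capitalize_after_dot
-- ===== SOURCE A (Python) =====
-- def capitalize_after_dot(_line):
--     result = []
--     capitalize = False
--
--     for char in _line:
--         if capitalize and not char.isspace():
--             result.append(char.upper())
--             capitalize = False
--         elif char == '.':
--             capitalize = True
--             result.append(char)
--         else:
--             result.append(char)
--
--     return ''.join(result)
-- ===== SOURCE B (Python) =====
-- def capitalize_after_dot(_line):
--     out = []
--     i = 0
--     n = len(_line)
--     while i < n:
--         c = _line[i]
--         out.append(c)
--         i += 1
--         if c == '.':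
--             while i < n and _line[i].isspace():
--                 out.append(_line[i])
--                 i += 1
--             if i < n:
--                 out.append(_line[i].upper())
--                 i += 1
--     return ''.join(out)
-- ===== Notes on version B (the rewrite author's own statement) =====
-- stated objective: simpler
-- what changed: Replaces A's boolean-flag-carrying single loop by a direct scan whose dot case consumes the whitespace run and the capitalized character inline (nested loop / mutual recursion), eliminating the flag state entirely.
import Mathlib
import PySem

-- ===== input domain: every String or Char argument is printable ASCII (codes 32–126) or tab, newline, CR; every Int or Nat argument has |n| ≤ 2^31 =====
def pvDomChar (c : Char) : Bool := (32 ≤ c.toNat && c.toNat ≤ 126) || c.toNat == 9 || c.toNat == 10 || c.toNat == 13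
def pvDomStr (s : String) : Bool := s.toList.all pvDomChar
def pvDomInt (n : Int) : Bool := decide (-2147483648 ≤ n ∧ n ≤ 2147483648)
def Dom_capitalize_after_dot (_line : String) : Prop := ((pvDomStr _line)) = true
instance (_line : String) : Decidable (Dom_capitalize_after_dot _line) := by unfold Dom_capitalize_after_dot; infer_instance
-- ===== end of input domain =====

-- B replaces A's flag-carrying accumulator loop by a direct scan that, on seeing '.',
-- consumes the following whitespace run and the capitalized character inline (objective: simpler decomposition, same cost).

-- ===== PORT A =====
-- A's loop body: state = (result list, capitalize flag)
def pvAStep (st : List Char × Bool) (c : Char) : List Char × Bool :=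
  if st.2 && !(PySem.Chars.isspace c) then (st.1 ++ [PySem.Chars.upperChar c], false)
  else if c = '.' then (st.1 ++ [c], true)
  else (st.1 ++ [c], st.2)

def capitalize_after_dot (_line : String) : String :=
  String.mk (List.foldl pvAStep ([], false) _line.toList).1

-- ===== PORT B =====
-- B's outer while-loop (pvBGo) and the after-dot phase: inner whitespace-copying
-- while-loop plus the single capitalization step (pvBDot), as mutual recursion.
mutual
def pvBGo : List Char → List Char
  | [] => []
  | c :: rest => if c = '.' then c :: pvBDot rest else c :: pvBGo rest
def pvBDot : List Char → List Char
  | [] => []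
  | c :: rest =>
      if PySem.Chars.isspace c then c :: pvBDot rest
      else PySem.Chars.upperChar c :: pvBGo rest
end

def capitalize_after_dot_alt (_line : String) : String :=
  String.mk (pvBGo _line.toList)

-- ===== PRECONDITION & SPEC =====
def Spec_capitalize_after_dot (_line : String) (out : String) : Prop := out = capitalize_after_dot_alt _line
instance (_line : String) (out : String) : Decidable (Spec_capitalize_after_dot _line out) := by unfold Spec_capitalize_after_dot; infer_instance

-- ===== CLAIM (what is proved, stated in full; the proofs are below) =====
def Claim_equal_capitalize_after_dot : Prop := ∀ (_line : String), Dom_capitalize_after_dot _line → Spec_capitalize_after_dot _line (capitalize_after_dot _line)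

-- ===== LEMMAS AND PROOFS =====
-- A's fold with flag = false computes pvBGo; with flag = true it computes pvBDot.
theorem pvKey (l : List Char) : ∀ acc : List Char,
    (List.foldl pvAStep (acc, false) l).1 = acc ++ pvBGo l ∧
    (List.foldl pvAStep (acc, true) l).1 = acc ++ pvBDot l := by
  induction l with
  | nil => intro acc; simp [pvBGo, pvBDot]
  | cons c rest ih =>
    intro acc
    constructor
    · by_cases hc : c = '.'
      · subst hc
        simpa [List.foldl, pvAStep, pvBGo] using (ih (acc ++ ['.'])).2
      · simpa [List.foldl, pvAStep, hc, pvBGo] using (ih (acc ++ [c])).1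
    · by_cases hs : PySem.Chars.isspace c
      · have hc : c ≠ '.' := by
          intro h; subst h
          simp [PySem.Chars.isspace] at hs
        simpa [List.foldl, pvAStep, hs, hc, pvBDot] using (ih (acc ++ [c])).2
      · simpa [List.foldl, pvAStep, hs, pvBDot] using
          (ih (acc ++ [PySem.Chars.upperChar c])).1

-- ===== VERDICT (by name: the statement is the Claim_ definition above) =====
theorem capitalize_after_dot_spec : Claim_equal_capitalize_after_dot := by
  intro s _
  unfold Spec_capitalize_after_dot capitalize_after_dot capitalize_after_dot_alt
  rw [(pvKey s.toList []).1]
  simp
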